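-- pv_equiv track=rewrite | github.com/mikhailolkhovskiy/made_2020_algo | 01/task_e.py | solve
-- ===== SOURCE A (Python) =====
-- def solve(n, prices):
--     memo = {}
--
--     def search(i, k,):
--         if (i, k) in memo:
--             return memo[(i, k)]
--         else:
--             if i == n:
--                 return 0, set()
--             else:
--                 if prices[i] > 100:
--                     price, days = search(i + 1, k + 1)
--                     r = prices[i] + price
--                 else:
--                     price, days = search(i + 1, k)
--                     r = prices[i] + price
--                 if k > 0:
--                     k_price, k_days = search(i + 1, k - 1)
--                     if r > k_price:
--                         r = k_price
--                         days = k_days | {i}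
--                 memo[(i, k)] = (r, days)
--                 return r, days
--
--     price, days = search(0, 0)
--     k2 = len(days)
--     k = 0
--     for i, p in enumerate(prices):
--         if p > 100 and i not in days:
--             k += 1
--     k1 = k - k2
--     k_days = [x + 1 for x in days]
--     return price, k1, k2, sorted(k_days)
-- ===== SOURCE B (Python) =====
-- def solve(n, prices):
--     # Bottom-up DP over rows: row holds (min_price, freed-day frozenset) for each coupon count k.
--     row = [(0, frozenset())] * (n + 1)
--     for i in range(n - 1, -1, -1):
--         p = prices[i]
--         new_row = []
--         for k in range(i + 1):
--             price, days = row[k + 1] if p > 100 else row[k]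
--             r = p + price
--             if k > 0:
--                 k_price, k_days = row[k - 1]
--                 if r > k_price:
--                     r, days = k_price, k_days | {i}
--             new_row.append((r, days))
--         row = new_row
--     price, days = row[0]
--     k2 = len(days)
--     k1 = len([i for i, q in enumerate(prices) if q > 100 and i not in days]) - k2
--     return price, k1, k2, sorted(x + 1 for x in days)
-- ===== Notes on version B (the rewrite author's own statement) =====
-- stated objective: alternative
-- what changed: Replaces A's top-down memoized recursion over (i, k) states by an explicit bottom-up DP: a row of (min_price, freed-day set) cells per index i, filled from i = n-1 down to 0 with the same two transitions and strict '>' tie-break.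
import Mathlib
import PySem

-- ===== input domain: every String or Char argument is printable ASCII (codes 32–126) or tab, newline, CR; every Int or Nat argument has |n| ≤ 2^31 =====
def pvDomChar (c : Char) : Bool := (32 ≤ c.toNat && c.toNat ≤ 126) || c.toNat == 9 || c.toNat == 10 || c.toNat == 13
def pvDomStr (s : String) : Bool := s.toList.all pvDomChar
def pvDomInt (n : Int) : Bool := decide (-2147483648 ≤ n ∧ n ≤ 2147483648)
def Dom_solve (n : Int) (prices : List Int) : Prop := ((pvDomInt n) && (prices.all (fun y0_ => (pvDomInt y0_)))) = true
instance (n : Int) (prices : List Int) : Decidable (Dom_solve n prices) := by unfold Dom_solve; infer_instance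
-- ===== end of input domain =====

-- One line: B replaces A's top-down memoized recursion by an explicit bottom-up DP table
-- filled row by row (objective: alternative decomposition, same asymptotic cost).

-- ===== PORT A =====
-- A's `search(i, k)` recursion; the `memo` dict is a pure cache (it never changes any
-- returned value), ported as the same recursion without the cache, with fuel `n - i`
-- supplying termination (under Pre_ the fuel never runs out and `prices[i]` is in range,
-- so the `.getD 0` default is never used).
def searchA (n : Int) (prices : List Int) : Nat → Int → Int → Int × PySem.Set Int
  | fuel, i, k =>
    if i = n then (0, PySem.Set.empty)
    else
      match fuel with
      | 0 => (0, PySem.Set.empty)      -- unreachable under Pre_solve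
      | fuel' + 1 =>
        let p := (PySem.List.pyGet? prices i).getD 0
        let pd := if p > 100 then searchA n prices fuel' (i + 1) (k + 1)
                  else searchA n prices fuel' (i + 1) k
        let r := p + pd.1
        if k > 0 then
          let kd := searchA n prices fuel' (i + 1) (k - 1)
          if r > kd.1 then (kd.1, PySem.Set.union kd.2 [i]) else (r, pd.2)
        else (r, pd.2)

def solve (n : Int) (prices : List Int) : Int × Int × Int × List Int :=
  let pd := searchA n prices n.toNat 0 0
  let price := pd.1
  let days := pd.2
  let k2 : Int := PySem.Set.len days
  let k : Int := (PySem.List.enumerate prices).foldl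
    (fun acc ip => if ip.2 > 100 ∧ ¬ PySem.Set.contains days ip.1 then acc + 1 else acc) 0
  let k1 := k - k2
  let k_days := days.map (fun x => x + 1)
  (price, k1, k2, PySem.List.sorted k_days (fun x => x) false)

-- ===== PORT B =====
-- one row of the bottom-up table: row for index i computed from the row for i+1
def stepB (prices : List Int) (i : Nat) (row : List (Int × PySem.Set Int)) :
    List (Int × PySem.Set Int) :=
  let p := prices.getD i 0
  (List.range (i + 1)).map (fun k =>
    let pd := if p > 100 then row.getD (k + 1) (0, PySem.Set.empty)
              else row.getD k (0, PySem.Set.empty)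
    let r := p + pd.1
    if k > 0 then
      let kd := row.getD (k - 1) (0, PySem.Set.empty)
      if r > kd.1 then (kd.1, PySem.Set.union kd.2 [(i : Int)]) else (r, pd.2)
    else (r, pd.2))

-- Source B's `for i in range(n-1, -1, -1)` loop, unrolled as recursion on the number of
-- completed iterations d (after d iterations the row is the one for index n - d)
def dpRows (prices : List Int) (n : Nat) : Nat → List (Int × PySem.Set Int)
  | 0 => List.replicate (n + 1) (0, PySem.Set.empty)
  | d + 1 => stepB prices (n - (d + 1)) (dpRows prices n d)

def solve_alt (n : Int) (prices : List Int) : Int × Int × Int × List Int :=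
  let row := dpRows prices n.toNat n.toNat
  let pd := row.getD 0 (0, PySem.Set.empty)
  let price := pd.1
  let days := pd.2
  let k2 : Int := PySem.Set.len days
  let k1 : Int := ((PySem.List.enumerate prices).filter
    (fun ip => decide (ip.2 > 100) && !(PySem.Set.contains days ip.1))).length - k2
  (price, k1, k2,
    PySem.List.sorted (days.map (fun x => x + 1)) (fun x => x) false)

-- ===== PRECONDITION & SPEC =====
-- A raises (IndexError, or unbounded recursion for n < 0) unless 0 ≤ n ≤ len(prices).
def Pre_solve (n : Int) (prices : List Int) : Prop := 0 ≤ n ∧ n ≤ prices.length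
instance (n : Int) (prices : List Int) : Decidable (Pre_solve n prices) := by
  unfold Pre_solve; infer_instance
def pvWitness_solve : Int × List Int := (3, [120, 50, 200])

def Spec_solve (n : Int) (prices : List Int) (out : Int × Int × Int × List Int) : Prop := out = solve_alt n prices
instance (n : Int) (prices : List Int) (out : Int × Int × Int × List Int) : Decidable (Spec_solve n prices out) := by unfold Spec_solve; infer_instance

-- ===== CLAIM (what is proved, stated in full; the proofs are below) =====
def Claim_equal_solve : Prop := ∀ (n : Int) (prices : List Int), Dom_solve n prices → Pre_solve n prices → Spec_solve n prices (solve n prices)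

-- ===== LEMMAS AND PROOFS =====

lemma dp_eq (prices : List Int) (n : Nat) : ∀ d, d ≤ n → ∀ k, k ≤ n - d →
    (dpRows prices n d).getD k (0, PySem.Set.empty)
      = searchA (↑n) prices d (↑(n - d)) (↑k) := by
  intro d
  induction d with
  | zero =>
    intro _ k hk
    rw [searchA]
    simp only [Nat.sub_zero]
    rw [dpRows, List.getD_eq_getElem?_getD, List.getElem?_replicate]
    have hkn : k < n + 1 := by omega
    simp [hkn]
  | succ d IH =>
    intro hd k hk
    have hdn : d ≤ n := by omega
    have hik : k < (n - (d + 1)) + 1 := by omega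
    rw [dpRows, stepB]
    simp only []
    rw [PySem.List.getD_map_range _ _ _ _ hik]
    rw [searchA]
    have hne : ((↑(n - (d + 1)) : Int)) ≠ (↑n : Int) := by
      have : n - (d + 1) < n := by omega
      exact_mod_cast Nat.ne_of_lt this
    rw [if_neg hne]
    have hp : (PySem.List.pyGet? prices (↑(n - (d + 1)))).getD 0
        = prices.getD (n - (d + 1)) 0 := by
      simp [PySem.List.pyGet?_natCast, List.getD_eq_getElem?_getD]
    have hsucc : ((↑(n - (d + 1)) : Int)) + 1 = ((↑(n - d) : Int)) := by
      have : n - (d + 1) + 1 = n - d := by omega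
      exact_mod_cast congrArg (Nat.cast (R := Int)) this
    rw [hp, hsucc]
    rw [IH hdn (k + 1) (by omega), IH hdn k (by omega)]
    push_cast
    by_cases hk0 : 0 < k
    · have hki : (0 : Int) < (↑k : Int) := by exact_mod_cast hk0
      have hkm : ((↑k : Int)) - 1 = ((↑(k - 1) : Int)) := by omega
      rw [if_pos hk0, if_pos hki, hkm, IH hdn (k - 1) (by omega)]
    · have hki : ¬ (0 : Int) < (↑k : Int) := by exact_mod_cast hk0
      rw [if_neg hk0, if_neg hki]

-- ===== VERDICT (by name: the statement is the Claim_ definition above) =====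
theorem solve_spec : Claim_equal_solve := by
  intro n prices _ hpre
  obtain ⟨hn0, hnl⟩ := hpre
  unfold Spec_solve
  have hcast : ((n.toNat : Int)) = n := Int.toNat_of_nonneg hn0
  have hmain : searchA n prices n.toNat 0 0
      = (dpRows prices n.toNat n.toNat).getD 0 (0, PySem.Set.empty) := by
    have h := dp_eq prices n.toNat n.toNat (le_refl _) 0 (by omega)
    simp only [Nat.sub_self, Nat.cast_zero, hcast] at h
    exact h.symm
  have hcount : ∀ (days : PySem.Set Int),
      (PySem.List.enumerate prices).foldl
        (fun acc ip => if ip.2 > 100 ∧ ¬ PySem.Set.contains days ip.1 then acc + 1 else acc) 0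
      = (((PySem.List.enumerate prices).filter
          (fun ip => decide (ip.2 > 100) && !(PySem.Set.contains days ip.1))).length : Int) := by
    intro days
    have hfun : (fun (acc : Int) (ip : Int × Int) =>
          if ip.2 > 100 ∧ ¬ PySem.Set.contains days ip.1 then acc + 1 else acc)
        = (fun acc ip =>
          if (fun ip : Int × Int => decide (ip.2 > 100) && !(PySem.Set.contains days ip.1)) ip = true
          then acc + 1 else acc) := by
      funext acc ip
      by_cases h : ip.2 > 100 ∧ ¬ PySem.Set.contains days ip.1 <;> simp_all
    rw [hfun, PySem.List.foldl_count_if]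
    simp [List.countP_eq_length_filter]
  simp only [solve, solve_alt, hmain, hcount]
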